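-- pv_equiv track=rewrite | github.com/Ronchy2000/Python_Study | 数据结构与算法/华为机试准备/真题收集/test2.py | convert_to_solo_style
-- ===== SOURCE A (Python) =====
-- def is_char(char):
--     if char>="a" and char<="z":
--         return True
--     if char>='A' and char <='Z':
--         return True
--     return False
--
-- def convert_to_solo_style(sentence):
--     # 定义元音字母集合（包含大小写）
--     vowels = set('aeiouAEIOU')
--     result = []
--
--     # 遍历句子中的每个字符
--     for char in sentence:
--         # 如果是元音字母，转换为大写
--         if char.lower() in vowels:
--             result.append(char.upper())
--         # 如果是辅音字母，转换为小写
--         elif is_char(char):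
--             result.append(char.lower())
--         # 如果不是字母（如空格、标点符号等），保持不变
--         else:
--             result.append(char)
--
--     # 将结果列表转换为字符串并返回
--     return ''.join(result)
-- ===== SOURCE B (Python) =====
-- _LETTERS = 'abcdefghijklmnopqrstuvwxyzABCDEFGHIJKLMNOPQRSTUVWXYZ'
-- _VOWELS = 'aeiouAEIOU'
-- _TABLE = str.maketrans({c: (c.upper() if c in _VOWELS else c.lower()) for c in _LETTERS})
--
-- def convert_to_solo_style(sentence):
--     # one precomputed translation table over exactly the 52 ASCII letters;
--     # every other character falls through unchanged
--     return sentence.translate(_TABLE)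
-- ===== Notes on version B (the rewrite author's own statement) =====
-- stated objective: idiomatic
-- what changed: Replaces the per-character branchy loop (vowel-set test, hand-written is_char range checks, list append + join) with a single precomputed str.maketrans table over the 52 ASCII letters and one sentence.translate call.
import Mathlib
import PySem

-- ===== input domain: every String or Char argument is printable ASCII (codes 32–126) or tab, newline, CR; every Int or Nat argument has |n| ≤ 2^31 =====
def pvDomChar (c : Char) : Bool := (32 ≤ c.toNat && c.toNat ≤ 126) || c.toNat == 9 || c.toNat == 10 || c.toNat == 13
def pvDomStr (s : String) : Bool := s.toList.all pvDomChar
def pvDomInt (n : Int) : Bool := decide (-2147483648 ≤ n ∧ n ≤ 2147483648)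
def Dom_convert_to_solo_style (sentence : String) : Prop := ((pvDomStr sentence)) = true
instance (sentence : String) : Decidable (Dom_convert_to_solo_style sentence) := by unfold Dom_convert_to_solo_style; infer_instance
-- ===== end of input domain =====

-- B replaces A's per-character branchy loop with a precomputed translation table
-- over the 52 ASCII letters and a single translate pass (idiomatic, same O(n) cost).


-- ===== PORT A =====
-- helper is_char: ASCII letter test by two range checks, branches in A's order
def is_char (char : Char) : Bool :=
  if char ≥ 'a' && char ≤ 'z' then true
  else if char ≥ 'A' && char ≤ 'Z' then true
  else false

-- per-character body of A's loop, in A's branch order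
def pvAStep (vowels : PySem.Set Char) (char : Char) : Char :=
  if vowels.contains (PySem.Chars.lowerChar char) then PySem.Chars.upperChar char
  else if is_char char then PySem.Chars.lowerChar char
  else char

def convert_to_solo_style (sentence : String) : String :=
  let vowels : PySem.Set Char := PySem.Set.ofList "aeiouAEIOU".toList
  let result : List Char :=
    sentence.toList.foldl (fun acc char => acc ++ [pvAStep vowels char]) []
  String.ofList result

-- ===== PORT B =====
-- B's module-level constants and maketrans table (a dict Char → Char)
def pvLetters : List Char := "abcdefghijklmnopqrstuvwxyzABCDEFGHIJKLMNOPQRSTUVWXYZ".toList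
def pvVowels : List Char := "aeiouAEIOU".toList
def pvTable : PySem.Dict Char Char :=
  pvLetters.foldl
    (fun d c =>
      d.insert c (if pvVowels.contains c then PySem.Chars.upperChar c else PySem.Chars.lowerChar c))
    (PySem.Dict.empty)

-- sentence.translate(table): each char mapped through the table, missing chars unchanged
def convert_to_solo_style_alt (sentence : String) : String :=
  String.ofList (sentence.toList.map (fun c => pvTable.getD c c))

-- ===== PRECONDITION & SPEC =====
def Spec_convert_to_solo_style (sentence : String) (out : String) : Prop := out = convert_to_solo_style_alt sentence
instance (sentence : String) (out : String) : Decidable (Spec_convert_to_solo_style sentence out) := by unfold Spec_convert_to_solo_style; infer_instance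

-- ===== CLAIM (what is proved, stated in full; the proofs are below) =====
def Claim_equal_convert_to_solo_style : Prop := ∀ (sentence : String), Dom_convert_to_solo_style sentence → Spec_convert_to_solo_style sentence (convert_to_solo_style sentence)

-- ===== LEMMAS AND PROOFS =====

-- A's foldl-with-append loop is the map of its step function
lemma pvA_foldl_eq_map (cs : List Char) (v : PySem.Set Char) (acc : List Char) :
    cs.foldl (fun acc char => acc ++ [pvAStep v char]) acc = acc ++ cs.map (pvAStep v) := by
  induction cs generalizing acc with
  | nil => simp
  | cons c cs ih => simp [List.foldl, ih]

-- the two per-character functions agree on every character of the domain (checked over all 127 codes ≤ 126)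
set_option maxRecDepth 20000 in
lemma pvStep_eq_fin :
    ∀ n : Fin 127, pvAStep (PySem.Set.ofList "aeiouAEIOU".toList) (Char.ofNat n) =
      pvTable.getD (Char.ofNat n) (Char.ofNat n) := by decide

lemma pvStep_eq (c : Char) (h : pvDomChar c = true) :
    pvAStep (PySem.Set.ofList "aeiouAEIOU".toList) c = pvTable.getD c c := by
  have hlt : c.toNat < 127 := by
    unfold pvDomChar at h
    simp only [Bool.or_eq_true, Bool.and_eq_true, decide_eq_true_eq, beq_iff_eq] at h
    omega
  have hc : Char.ofNat c.toNat = c := Char.ofNat_toNat c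
  have := pvStep_eq_fin ⟨c.toNat, hlt⟩
  simpa [hc] using this

-- ===== VERDICT (by name: the statement is the Claim_ definition above) =====
set_option maxRecDepth 20000 in
theorem convert_to_solo_style_spec : Claim_equal_convert_to_solo_style := by
  intro s hdom
  unfold Spec_convert_to_solo_style convert_to_solo_style convert_to_solo_style_alt
  simp only [pvA_foldl_eq_map, List.nil_append]
  congr 1
  apply List.map_congr_left
  intro c hc
  have : pvDomChar c = true := by
    have := hdom
    unfold Dom_convert_to_solo_style pvDomStr at this
    exact List.all_eq_true.mp this c hc
  exact pvStep_eq c this
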